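-- pv_equiv track=rewrite | github.com/EC-DIGIT-CSIRC/sysdiagnose | src/sysdiagnose/utils/string_parser_old.py | prepare_line
-- ===== SOURCE A (Python) =====
-- def prepare_line(line: str) -> str:
--     """ remove unnecessary double-quotes
--     quotes are needed when a comma is inside.
--         example :
--         <key1 val1, k2 "hello, world"> != <key1 val1, k2 hello, world>
--
--     Note : regex cant be used, need to be statefull i.e. consider opening and closing quotes
--         example that doesnt work with regex: "a,"b"c,"
--         gives : '"a,bc,"'
--         should give : '"a,"b"c,"'
--         (the quotes in "a," aren't removed bcs of the comma, so "b" is detected as a string)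
--     """
--     inside = False
--     opening_pos = None
--     skipping = False
--     parse_char = (',', '=', '{', '}', '(', ')', '<', '>')
--     line = line.strip()
--
--     i = 0
--     while i < len(line):
--         if line[i] == '"':
--             if inside:
--                 if not skipping:
--                     line = line[:i] + line[i + 1:]    # remove last "
--                     line = line[:opening_pos] + line[opening_pos + 1:]    # remove first "
--                     i -= 1
--                 else:
--                     i += 1
--                 inside = False
--
--             else:
--                 inside = True
--                 opening_pos = i
--                 skipping = False
--                 i += 1
--             continue
--
--         if inside and line[i] in parse_char:
--             skipping = True
--
--         i += 1
--
--     return line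
-- ===== SOURCE B (Python) =====
-- def prepare_line(line: str) -> str:
--     """Single left-to-right pass with an output buffer: buffer each quoted
--     segment and decide once, at its closing quote, whether the quotes stay."""
--     parse_chars = ",={}()<>"
--     out = []
--     seg = None  # buffered chars of the currently open quoted segment, or None
--     for ch in line.strip():
--         if ch == '"':
--             if seg is None:
--                 seg = []
--             else:
--                 if any(c in parse_chars for c in seg):
--                     out.append('"')
--                     out.extend(seg)
--                     out.append('"')
--                 else:
--                     out.extend(seg)
--                 seg = None
--         elif seg is not None:
--             seg.append(ch)
--         else:
--             out.append(ch)
--     if seg is not None: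
--         out.append('"')
--         out.extend(seg)
--     return ''.join(out)
-- ===== Notes on version B (the rewrite author's own statement) =====
-- stated objective: faster
-- what changed: Replaces A's stateful rescan with repeated full-string slicing deletions (line = line[:i]+line[i+1:] inside the while loop) by a single left-to-right pass that buffers each quoted segment and appends it to an output buffer, with or without its quotes, once its closing quote is seen.
import Mathlib
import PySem

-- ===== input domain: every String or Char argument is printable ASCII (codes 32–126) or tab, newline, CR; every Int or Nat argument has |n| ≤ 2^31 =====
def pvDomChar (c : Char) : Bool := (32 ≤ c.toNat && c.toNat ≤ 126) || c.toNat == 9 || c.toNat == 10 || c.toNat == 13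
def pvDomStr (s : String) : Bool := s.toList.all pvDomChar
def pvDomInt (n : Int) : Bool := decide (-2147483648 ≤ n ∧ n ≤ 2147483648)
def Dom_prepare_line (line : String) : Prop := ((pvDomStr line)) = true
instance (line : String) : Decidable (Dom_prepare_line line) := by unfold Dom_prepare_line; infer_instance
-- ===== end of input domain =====

-- B replaces A's repeated in-place string slicing (rescanning after every deletion)
-- by a single pass with an output buffer and a per-segment quote decision; faster (asymptotic).

-- ===== PORT A =====
-- the delimiter set: A's tuple parse_char / B's string parse_chars (shared lookup helper)
def pvParseChar (c : Char) : Bool := c ∈ [',', '=', '{', '}', '(', ')', '<', '>']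

-- A's while loop: state = (current line, i, inside, opening_pos, skipping).
-- opening_pos is None before the first quote; it is only read while inside, so it is
-- ported as a Nat initialised to 0.  The fuel counter only makes the recursion
-- structural: any fuel > 2*len(line) - i is never exhausted (proved in pvALoop_spec).
def pvALoop (fuel : Nat) (l : List Char) (i : Nat) (inside : Bool) (opening : Nat)
    (skipping : Bool) : List Char :=
  match fuel with
  | 0 => l
  | fuel + 1 =>
    if h : i < l.length then
      if l[i] = '"' then
        if inside then
          if !skipping then
            -- line = line[:i] + line[i+1:]; line = line[:opening]+line[opening+1:]; i -= 1
            let l' := l.take i ++ l.drop (i + 1)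
            let l'' := l'.take opening ++ l'.drop (opening + 1)
            pvALoop fuel l'' (i - 1) false opening skipping
          else
            pvALoop fuel l (i + 1) false opening skipping
        else
          pvALoop fuel l (i + 1) true i false
      else
        if inside && pvParseChar l[i] then
          pvALoop fuel l (i + 1) inside opening true
        else
          pvALoop fuel l (i + 1) inside opening skipping
    else l

def prepare_line (line : String) : String :=
  String.mk (pvALoop (2 * (PySem.Str.strip line).toList.length + 1)
    (PySem.Str.strip line).toList 0 false 0 false)

-- ===== PORT B =====
-- one iteration of B's for loop: state = (out, seg)
def pvBStep (st : List Char × Option (List Char)) (c : Char) : List Char × Option (List Char) :=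
  match st with
  | (out, seg?) =>
    if c = '"' then
      match seg? with
      | none => (out, some [])
      | some seg =>
        if seg.any pvParseChar then (out ++ '"' :: seg ++ ['"'], none)
        else (out ++ seg, none)
    else
      match seg? with
      | some seg => (out, some (seg ++ [c]))
      | none => (out ++ [c], none)

def prepare_line_alt (line : String) : String :=
  let st := (PySem.Str.strip line).toList.foldl pvBStep ([], none)
  match st with
  | (out, none) => String.mk out
  | (out, some seg) => String.mk (out ++ '"' :: seg)

-- ===== PRECONDITION & SPEC =====
def Spec_prepare_line (line : String) (out : String) : Prop := out = prepare_line_alt line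
instance (line : String) (out : String) : Decidable (Spec_prepare_line line out) := by unfold Spec_prepare_line; infer_instance

-- ===== CLAIM (what is proved, stated in full; the proofs are below) =====
def Claim_equal_prepare_line : Prop := ∀ (line : String), Dom_prepare_line line → Spec_prepare_line line (prepare_line line)

-- ===== LEMMAS AND PROOFS =====

-- proof-side recursive characterisation of B's fold
def pvB : List Char → Option (List Char) → List Char
  | [], none => []
  | [], some seg => '"' :: seg
  | c :: rest, none =>
    if c = '"' then pvB rest (some []) else c :: pvB rest none
  | c :: rest, some seg =>
    if c = '"' then
      (if seg.any pvParseChar then '"' :: seg ++ ['"'] else seg) ++ pvB rest none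
    else pvB rest (some (seg ++ [c]))

theorem pvB_fold (cs : List Char) : ∀ (out : List Char) (seg? : Option (List Char)),
    (match cs.foldl pvBStep (out, seg?) with
     | (o, none) => o
     | (o, some seg) => o ++ '"' :: seg) = out ++ pvB cs seg? := by
  induction cs with
  | nil => intro out seg?; cases seg? <;> simp [pvB]
  | cons c rest ih =>
    intro out seg?
    cases seg? with
    | none =>
      by_cases hc : c = '"'
      · simp [pvBStep, hc, pvB, ih]
      · simp [pvBStep, hc, pvB, ih]
    | some seg =>
      by_cases hc : c = '"'
      · by_cases hp : seg.any pvParseChar <;> simp [pvBStep, hc, hp, pvB, ih]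
      · simp [pvBStep, hc, pvB, ih]

-- Main invariant lemma relating A's index loop to pvB.
theorem pvALoop_spec (n : Nat) : ∀ (l : List Char) (i : Nat), 2 * l.length - i < n → i ≤ l.length →
    (∀ opening skipping, pvALoop n l i false opening skipping = l.take i ++ pvB (l.drop i) none) ∧
    (∀ opening skipping, opening < i → l[opening]? = some '"' →
      '"' ∉ (l.take i).drop (opening + 1) →
      skipping = ((l.take i).drop (opening + 1)).any pvParseChar →
      pvALoop n l i true opening skipping =
        l.take opening ++ pvB (l.drop i) (some ((l.take i).drop (opening + 1)))) := by
  induction n with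
  | zero => intro l i hn; omega
  | succ n ih =>
    intro l i hn hi
    by_cases h : i < l.length
    · have hdrop : l.drop i = l[i] :: l.drop (i + 1) := List.drop_eq_getElem_cons h
      have htake : l.take (i + 1) = l.take i ++ [l[i]] := by
        rw [List.take_succ]; simp [List.getElem?_eq_getElem h]
      constructor
      · intro opening skipping
        rw [pvALoop, dif_pos h]
        by_cases hc : l[i] = '"'
        · -- open a segment
          rw [if_pos hc, if_neg (by decide : ¬ (false = true))]
          have hnil : (l.take (i+1)).drop (i + 1) = [] := by
            apply List.drop_eq_nil_of_le; simp
          have := (ih l (i+1) (by omega) (by omega)).2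
            i false (Nat.lt_succ_self i)
            (by rw [List.getElem?_eq_getElem h, hc])
            (by rw [hnil]; simp)
            (by rw [hnil]; rfl)
          rw [this, hnil, hdrop, hc]
          simp [pvB]
        · -- plain char outside quotes
          rw [if_neg hc, Bool.false_and, if_neg (by decide : ¬ (false = true))]
          have := (ih l (i+1) (by omega) (by omega)).1
            opening skipping
          rw [this, hdrop, htake, List.append_assoc, List.singleton_append]
          have hpv : pvB (l[i] :: l.drop (i+1)) none = l[i] :: pvB (l.drop (i+1)) none := by
            simp [pvB, hc]
          rw [hpv]
      · intro opening skipping hop hquote hnoq hskip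
        have hseg : ((l.take (i+1)).drop (opening + 1)) = ((l.take i).drop (opening + 1)) ++ [l[i]] := by
          rw [htake, List.drop_append_of_le_length (by simp; omega)]
        have hts : l.take i = l.take opening ++ '"' :: ((l.take i).drop (opening + 1)) := by
          have h1 : l.take i = (l.take i).take (opening + 1) ++ (l.take i).drop (opening + 1) :=
            (List.take_append_drop _ _).symm
          have h2 : (l.take i).take (opening + 1) = l.take opening ++ ['"'] := by
            rw [List.take_take, min_eq_left (by omega), List.take_succ]
            have h3 : l[opening]?.toList = ['"'] := by rw [hquote]; rfl
            rw [h3]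
          conv_lhs => rw [h1]
          rw [h2]; simp
        rw [pvALoop, dif_pos h]
        by_cases hc : l[i] = '"'
        · -- closing quote
          rw [if_pos hc, if_pos rfl]
          by_cases hsk : skipping = true
          · -- segment had a delimiter: keep the quotes
            subst hsk
            rw [if_neg (by decide : ¬ ((!true) = true))]
            have := (ih l (i+1) (by omega) (by omega)).1
              opening true
            have hany : ((l.take i).drop (opening + 1)).any pvParseChar = true := hskip.symm
            have hpv : pvB ('"' :: l.drop (i+1)) (some ((l.take i).drop (opening+1)))
                = ('"' :: (l.take i).drop (opening+1) ++ ['"']) ++ pvB (l.drop (i+1)) none := by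
              simp [pvB, hany]
            rw [this, htake, hdrop, hc, hpv]
            conv_lhs => rw [hts]
            simp
          · -- segment delimiter-free: remove both quotes
            simp only [Bool.not_eq_true] at hsk
            subst hsk
            rw [if_pos (by decide : (!false) = true)]
            set seg := (l.take i).drop (opening + 1) with hsegdef
            have hseglen : seg.length = i - opening - 1 := by
              simp [hsegdef]; omega
            have hl' : (l.take i ++ l.drop (i+1)).take opening = l.take opening := by
              rw [List.take_append_of_le_length (by simp; omega), List.take_take,
                min_eq_left (by omega)]
            have hl'd : (l.take i ++ l.drop (i+1)).drop (opening + 1) = seg ++ l.drop (i+1) := by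
              rw [List.drop_append_of_le_length (by simp; omega)]
            have hl'' : (l.take i ++ l.drop (i+1)).take opening ++ (l.take i ++ l.drop (i+1)).drop (opening+1)
                = (l.take opening ++ seg) ++ l.drop (i+1) := by
              rw [hl', hl'd]; simp
            show pvALoop n ((l.take i ++ l.drop (i+1)).take opening ++
                (l.take i ++ l.drop (i+1)).drop (opening + 1)) (i - 1) false opening false =
              List.take opening l ++ pvB (List.drop i l) (some seg)
            rw [hl'']
            set m := (l.take opening ++ seg) ++ l.drop (i + 1) with hm
            have hmlen : m.length = l.length - 2 := by
              simp [hm, hseglen]; omega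
            have hpre : (l.take opening ++ seg).length = i - 1 := by
              simp [hseglen]; omega
            have hmt : m.take (i - 1) = l.take opening ++ seg := by
              rw [hm, ← hpre, List.take_left]
            have hmd : m.drop (i - 1) = l.drop (i + 1) := by
              rw [hm, ← hpre, List.drop_left]
            have := (ih m (i-1) (by omega) (by omega)).1
              opening false
            have hany : seg.any pvParseChar = false := hskip.symm
            have hpv : pvB ('"' :: l.drop (i+1)) (some seg) = seg ++ pvB (l.drop (i+1)) none := by
              simp [pvB, hany]
            rw [this, hmt, hmd, hdrop, hc, hpv, List.append_assoc]
        · -- ordinary char inside quotes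
          rw [if_neg hc, Bool.true_and]
          have hnoq' : '"' ∉ (l.take (i+1)).drop (opening + 1) := by
            rw [hseg]; simp [hnoq, Ne.symm hc]
          by_cases hp : pvParseChar l[i] = true
          · have hpc : pvParseChar l[i] = true := hp
            rw [if_pos hpc]
            have := (ih l (i+1) (by omega) (by omega)).2
              opening true (by omega) hquote hnoq' (by rw [hseg]; simp [hp])
            rw [this, hdrop, hseg]
            simp [pvB, hc]
          · have hpc : ¬ (pvParseChar l[i] = true) := hp
            rw [if_neg hpc]
            have := (ih l (i+1) (by omega) (by omega)).2
              opening skipping (by omega) hquote hnoq'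
              (by rw [hseg, List.any_append, ← hskip]; simp [hp])
            rw [this, hdrop, hseg]
            simp [pvB, hc]
    · -- i ≥ length : loop ends
      constructor
      · intro opening skipping
        rw [pvALoop, dif_neg h]
        have hieq : i = l.length := by omega
        simp [hieq, pvB]
      · intro opening skipping hop hquote hnoq hskip
        rw [pvALoop, dif_neg h]
        have hieq : i = l.length := by omega
        have hts : l.take i = l.take opening ++ '"' :: ((l.take i).drop (opening + 1)) := by
          have h1 : l.take i = (l.take i).take (opening + 1) ++ (l.take i).drop (opening + 1) :=
            (List.take_append_drop _ _).symm
          have h2 : (l.take i).take (opening + 1) = l.take opening ++ ['"'] := by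
            rw [List.take_take, min_eq_left (by omega), List.take_succ]
            have h3 : l[opening]?.toList = ['"'] := by rw [hquote]; rfl
            rw [h3]
          conv_lhs => rw [h1]
          rw [h2]; simp
        have hd : l.drop i = [] := by simp [hieq]
        rw [hd]
        conv_lhs => rw [← List.take_append_drop i l, hd, List.append_nil, hts]
        simp [pvB]

theorem prepare_line_eq (line : String) : prepare_line line = prepare_line_alt line := by
  unfold prepare_line prepare_line_alt
  set l := (PySem.Str.strip line).toList with hl
  have hA := (pvALoop_spec (2 * l.length + 1) l 0 (by omega) (by omega)).1 0 false
  have hB := pvB_fold l [] none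
  simp only [List.take_zero, List.drop_zero, List.nil_append] at hA
  rw [hA]
  rcases hfold : l.foldl pvBStep ([], none) with ⟨o, seg?⟩
  rw [hfold] at hB
  cases seg? <;> simp at hB <;> simp [hB]

-- ===== VERDICT (by name: the statement is the Claim_ definition above) =====
theorem prepare_line_spec : Claim_equal_prepare_line := by
  intro line _
  unfold Spec_prepare_line
  exact prepare_line_eq line
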